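-- pv_equiv track=rewrite | github.com/The-Harsh-Vardhan/RetailPulse | scripts/export_databricks_source_to_ipynb.py | split_databricks_cells
-- ===== SOURCE A (Python) =====
-- HEADER = "# Databricks notebook source"
--
-- CELL_SEPARATOR = "# COMMAND ----------"
--
-- def split_databricks_cells(text: str) -> list[list[str]]:
--     raw_lines = text.splitlines()
--     if raw_lines and raw_lines[0].strip() == HEADER:
--         raw_lines = raw_lines[1:]
--
--     cells: list[list[str]] = []
--     current: list[str] = []
--     for line in raw_lines:
--         if line.strip() == CELL_SEPARATOR:
--             cells.append(current)
--             current = []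
--             continue
--         current.append(line)
--     cells.append(current)
--     return cells
-- ===== SOURCE B (Python) =====
-- HEADER = "# Databricks notebook source"
--
-- CELL_SEPARATOR = "# COMMAND ----------"
--
-- def _first_sep(lines):
--     for i, line in enumerate(lines):
--         if line.strip() == CELL_SEPARATOR:
--             return i
--     return None
--
-- def _cells(lines):
--     i = _first_sep(lines)
--     if i is None:
--         return [lines]
--     return [lines[:i]] + _cells(lines[i + 1:])
--
-- def split_databricks_cells(text: str) -> list[list[str]]:
--     lines = text.splitlines()
--     if lines and lines[0].strip() == HEADER:
--         lines = lines[1:]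
--     return _cells(lines)
-- ===== Notes on version B (the rewrite author's own statement) =====
-- stated objective: alternative
-- what changed: B replaces A's single accumulator loop (flush the current cell at each separator) with a recursive divide-and-conquer: find the first separator line, emit the prefix as a cell, and recurse on the remainder.
import Mathlib
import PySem

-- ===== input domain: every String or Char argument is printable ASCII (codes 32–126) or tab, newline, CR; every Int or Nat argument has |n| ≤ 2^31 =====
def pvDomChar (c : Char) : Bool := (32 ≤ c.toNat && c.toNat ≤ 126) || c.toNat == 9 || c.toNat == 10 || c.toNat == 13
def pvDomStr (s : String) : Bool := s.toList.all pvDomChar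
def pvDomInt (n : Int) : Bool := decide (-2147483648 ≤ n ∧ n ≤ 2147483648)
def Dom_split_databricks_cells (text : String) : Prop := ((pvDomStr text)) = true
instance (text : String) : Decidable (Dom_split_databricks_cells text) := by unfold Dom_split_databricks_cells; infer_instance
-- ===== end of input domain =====

-- B replaces A's accumulator loop with a recursive decomposition (find first separator,
-- emit the prefix as a cell, recurse on the rest); objective: alternative, same cost.

def pvHEADER : String := "# Databricks notebook source"

def pvCELL_SEPARATOR : String := "# COMMAND ----------"

-- ===== PORT A =====
def split_databricks_cells (text : String) : List (List String) :=
  let raw0 := PySem.Str.splitlines text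
  let raw_lines :=
    match raw0 with
    | [] => ([] : List String)
    | h :: t => if PySem.Str.strip h == pvHEADER then t else h :: t
  let st := raw_lines.foldl
    (fun (s : List (List String) × List String) (line : String) =>
      if PySem.Str.strip line == pvCELL_SEPARATOR then (s.1 ++ [s.2], ([] : List String))
      else (s.1, s.2 ++ [line]))
    (([] : List (List String)), ([] : List String))
  st.1 ++ [st.2]

-- ===== PORT B =====
-- _first_sep: the for-loop over enumerate(lines), returning at the first separator line
def pvFirstSep : List String → Nat → Option Nat
  | [], _ => none
  | l :: ls, i =>
    if PySem.Str.strip l == pvCELL_SEPARATOR then some i else pvFirstSep ls (i + 1)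

-- needed by pvCellsB's decreasing_by: a found index means the list is nonempty
lemma pvFirstSep_pos (ls : List String) (k i : Nat) (h : pvFirstSep ls k = some i) :
    0 < ls.length := by
  cases ls with
  | nil => simp [pvFirstSep] at h
  | cons l ls => simp

-- _cells: prefix before the first separator is one cell, recurse on the remainder.
-- lines[:i] / lines[i+1:] are List.take / List.drop exactly, since i ≥ 0 here.
def pvCellsB (lines : List String) : List (List String) :=
  match h : pvFirstSep lines 0 with
  | none => [lines]
  | some i => lines.take i :: pvCellsB (lines.drop (i + 1))
termination_by lines.length
decreasing_by
  have := pvFirstSep_pos lines 0 i h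
  simp
  omega

def split_databricks_cells_alt (text : String) : List (List String) :=
  let raw0 := PySem.Str.splitlines text
  let lines :=
    match raw0 with
    | [] => ([] : List String)
    | h :: t => if PySem.Str.strip h == pvHEADER then t else h :: t
  pvCellsB lines

-- ===== PRECONDITION & SPEC =====
def Spec_split_databricks_cells (text : String) (out : List (List String)) : Prop := out = split_databricks_cells_alt text
instance (text : String) (out : List (List String)) : Decidable (Spec_split_databricks_cells text out) := by unfold Spec_split_databricks_cells; infer_instance

-- ===== CLAIM (what is proved, stated in full; the proofs are below) =====
def Claim_equal_split_databricks_cells : Prop := ∀ (text : String), Dom_split_databricks_cells text → Spec_split_databricks_cells text (split_databricks_cells text)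

-- ===== LEMMAS AND PROOFS =====

-- reference recursion characterising A: one cell accumulated line by line, flushed at separators
def pvSplitRec (cur : List String) : List String → List (List String)
  | [] => [cur]
  | l :: ls =>
    if PySem.Str.strip l == pvCELL_SEPARATOR then cur :: pvSplitRec [] ls
    else pvSplitRec (cur ++ [l]) ls

lemma pvA_loop (ls : List String) :
    ∀ (cells : List (List String)) (cur : List String),
    (ls.foldl
      (fun (s : List (List String) × List String) (line : String) =>
        if PySem.Str.strip line == pvCELL_SEPARATOR then (s.1 ++ [s.2], ([] : List String))
        else (s.1, s.2 ++ [line]))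
      (cells, cur)).1
    ++ [(ls.foldl
      (fun (s : List (List String) × List String) (line : String) =>
        if PySem.Str.strip line == pvCELL_SEPARATOR then (s.1 ++ [s.2], ([] : List String))
        else (s.1, s.2 ++ [line]))
      (cells, cur)).2]
    = cells ++ pvSplitRec cur ls := by
  induction ls with
  | nil => intro cells cur; simp [pvSplitRec]
  | cons l ls ih =>
    intro cells cur
    rw [List.foldl_cons]
    by_cases h : PySem.Str.strip l == pvCELL_SEPARATOR
    · rw [if_pos h, ih]
      simp [pvSplitRec, h]
    · rw [if_neg h, ih]
      simp [pvSplitRec, h]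

lemma pvFirstSep_shift (ls : List String) :
    ∀ k : Nat, pvFirstSep ls (k + 1) = (pvFirstSep ls k).map (· + 1) := by
  induction ls with
  | nil => intro k; rfl
  | cons l ls ih =>
    intro k
    by_cases h : PySem.Str.strip l == pvCELL_SEPARATOR
    · simp [pvFirstSep, h]
    · simp [pvFirstSep, h, ih (k + 1)]

lemma pvRec_eq (ls : List String) : ∀ cur : List String,
    pvSplitRec cur ls =
      match pvFirstSep ls 0 with
      | none => [cur ++ ls]
      | some i => (cur ++ ls.take i) :: pvSplitRec [] (ls.drop (i + 1)) := by
  induction ls with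
  | nil => intro cur; simp [pvSplitRec, pvFirstSep]
  | cons l ls ih =>
    intro cur
    by_cases h : PySem.Str.strip l == pvCELL_SEPARATOR
    · simp [pvSplitRec, pvFirstSep, h]
    · have hshift : pvFirstSep (l :: ls) 0 = (pvFirstSep ls 0).map (· + 1) := by
        simp [pvFirstSep, h]
        exact pvFirstSep_shift ls 0
      rw [hshift]
      have hl : pvSplitRec cur (l :: ls) = pvSplitRec (cur ++ [l]) ls := by
        simp [pvSplitRec, h]
      rw [hl, ih (cur ++ [l])]
      cases hfs : pvFirstSep ls 0 with
      | none => simp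
      | some j => simp

lemma pvCellsB_eq (ls : List String) : pvCellsB ls = pvSplitRec [] ls := by
  fun_induction pvCellsB ls with
  | case1 ls h => rw [pvRec_eq ls [], h]; simp
  | case2 ls i h ih => rw [pvRec_eq ls [], h, ih]; simp

-- ===== VERDICT (by name: the statement is the Claim_ definition above) =====
theorem split_databricks_cells_spec : Claim_equal_split_databricks_cells := by
  intro text _
  unfold Spec_split_databricks_cells split_databricks_cells split_databricks_cells_alt
  generalize (PySem.Str.splitlines text) = raw0
  have main : ∀ ls : List String,
      (ls.foldl
        (fun (s : List (List String) × List String) (line : String) =>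
          if PySem.Str.strip line == pvCELL_SEPARATOR then (s.1 ++ [s.2], ([] : List String))
          else (s.1, s.2 ++ [line]))
        (([] : List (List String)), ([] : List String))).1
      ++ [(ls.foldl
        (fun (s : List (List String) × List String) (line : String) =>
          if PySem.Str.strip line == pvCELL_SEPARATOR then (s.1 ++ [s.2], ([] : List String))
          else (s.1, s.2 ++ [line]))
        (([] : List (List String)), ([] : List String))).2]
      = pvCellsB ls := by
    intro ls
    rw [pvCellsB_eq]
    simpa using pvA_loop ls [] []
  cases raw0 with
  | nil => exact main []
  | cons h t =>
    by_cases hh : PySem.Str.strip h == pvHEADER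
    · simpa [hh] using main t
    · simpa [hh] using main (h :: t)
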